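-- pv_equiv track=rewrite | github.com/nickless079/TeamCoder | src/utils/group_dialogue.py | _are_same_type_agents
-- ===== SOURCE A (Python) =====
-- from typing import Dict, Any, List, Optional, Tuple
--
-- def _are_same_type_agents(agent_names: List[str]) -> bool:
--     """判断是否是相同类型的智能体"""
--     agent_types = {
--         "technical": ["SolutionPlanningAgent", "CodeAgent"],
--         "quality": ["TestAgent"],
--         "management": ["CTOAgent"]
--     }
--
--     for agent_type, agents in agent_types.items():
--         if all(name in agents for name in agent_names if name):
--             return True
--     return False
-- ===== SOURCE B (Python) =====
-- def _are_same_type_agents(agent_names):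
--     """判断是否是相同类型的智能体"""
--     type_of = {
--         "SolutionPlanningAgent": "technical",
--         "CodeAgent": "technical",
--         "TestAgent": "quality",
--         "CTOAgent": "management",
--     }
--     types = {type_of.get(name) for name in agent_names if name}
--     return len(types) <= 1 and None not in types
-- ===== Notes on version B (the rewrite author's own statement) =====
-- stated objective: idiomatic
-- what changed: Replaces the loop over type groups with inner membership scans by an inverted name-to-type dict and one set comprehension: same type iff at most one mapped type and no unknown name.
import Mathlib
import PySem

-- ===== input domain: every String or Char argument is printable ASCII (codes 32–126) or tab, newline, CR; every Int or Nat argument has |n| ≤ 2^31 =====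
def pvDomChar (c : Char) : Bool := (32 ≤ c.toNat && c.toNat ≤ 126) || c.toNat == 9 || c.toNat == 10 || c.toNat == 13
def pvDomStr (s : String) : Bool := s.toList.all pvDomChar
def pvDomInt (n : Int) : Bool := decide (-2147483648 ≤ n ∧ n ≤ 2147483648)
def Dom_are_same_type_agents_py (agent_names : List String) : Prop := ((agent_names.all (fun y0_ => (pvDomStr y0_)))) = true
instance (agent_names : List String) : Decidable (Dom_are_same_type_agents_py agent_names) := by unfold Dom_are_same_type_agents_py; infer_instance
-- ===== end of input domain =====

-- B replaces A's loop over the three type groups (each with an inner membership scan) by an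
-- inverted name→type dict and a single set comprehension over the names (objective: idiomatic).

-- ===== PORT A =====
def are_same_type_agents_py (agent_names : List String) : Bool :=
  let agent_types : PySem.Dict String (List String) :=
    PySem.Dict.ofList [("technical", ["SolutionPlanningAgent", "CodeAgent"]),
                       ("quality", ["TestAgent"]),
                       ("management", ["CTOAgent"])]
  -- 'for agent_type, agents in agent_types.items(): if all(...): return True / return False'
  agent_types.items.any (fun p =>
    (agent_names.filter (fun name => name != "")).all (fun name => p.2.contains name))

-- ===== PORT B =====
def pvTypeOf : PySem.Dict String String :=
  PySem.Dict.ofList [("SolutionPlanningAgent", "technical"), ("CodeAgent", "technical"),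
                     ("TestAgent", "quality"), ("CTOAgent", "management")]

def are_same_type_agents_py_alt (agent_names : List String) : Bool :=
  let types : PySem.Set (Option String) :=
    PySem.Set.ofList ((agent_names.filter (fun name => name != "")).map
      (fun name => pvTypeOf.get? name))
  decide (PySem.Set.len types ≤ 1) && !(PySem.Set.contains types none)

-- ===== PRECONDITION & SPEC =====
def Spec_are_same_type_agents_py (agent_names : List String) (out : Bool) : Prop := out = are_same_type_agents_py_alt agent_names
instance (agent_names : List String) (out : Bool) : Decidable (Spec_are_same_type_agents_py agent_names out) := by unfold Spec_are_same_type_agents_py; infer_instance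

-- ===== CLAIM (what is proved, stated in full; the proofs are below) =====
def Claim_equal_are_same_type_agents_py : Prop := ∀ (agent_names : List String), Dom_are_same_type_agents_py agent_names → Spec_are_same_type_agents_py agent_names (are_same_type_agents_py agent_names)

-- ===== LEMMAS AND PROOFS =====

-- the mapped list both characterizations talk about
def pvMapped (l : List String) : List (Option String) :=
  (l.filter (fun name => name != "")).map (fun name => pvTypeOf.get? name)

lemma pvTypeOf_get? (n : String) :
    pvTypeOf.get? n =
      if n = "SolutionPlanningAgent" then some "technical"
      else if n = "CodeAgent" then some "technical"
      else if n = "TestAgent" then some "quality"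
      else if n = "CTOAgent" then some "management"
      else none := by
  have h : pvTypeOf = PySem.Dict.mk [("SolutionPlanningAgent", "technical"), ("CodeAgent", "technical"),
      ("TestAgent", "quality"), ("CTOAgent", "management")] := by decide
  have hnil : (PySem.Dict.mk ([] : List (String × String))).get? n = none := rfl
  rw [h]
  simp only [PySem.Dict.get?_mk_cons, beq_iff_eq, hnil]
  by_cases h1 : n = "SolutionPlanningAgent" <;> by_cases h2 : n = "CodeAgent" <;>
    by_cases h3 : n = "TestAgent" <;> by_cases h4 : n = "CTOAgent" <;>
    simp [h1, h2, h3, h4, eq_comm]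

lemma pvTypeOf_range (x : Option String) (l : List String) (hx : x ∈ pvMapped l) :
    x = none ∨ x = some "technical" ∨ x = some "quality" ∨ x = some "management" := by
  simp only [pvMapped, List.mem_map] at hx
  obtain ⟨n, -, rfl⟩ := hx
  rw [pvTypeOf_get?]
  split_ifs <;> simp

lemma pvMemT (n : String) :
    (["SolutionPlanningAgent", "CodeAgent"].contains n = true) ↔ pvTypeOf.get? n = some "technical" := by
  rw [pvTypeOf_get?]
  simp only [List.contains_cons, List.contains_nil, Bool.or_false]
  split_ifs <;> simp_all

lemma pvMemQ (n : String) :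
    (["TestAgent"].contains n = true) ↔ pvTypeOf.get? n = some "quality" := by
  rw [pvTypeOf_get?]
  simp only [List.contains_cons, List.contains_nil, Bool.or_false, beq_iff_eq]
  split_ifs <;> simp_all

lemma pvMemM (n : String) :
    (["CTOAgent"].contains n = true) ↔ pvTypeOf.get? n = some "management" := by
  rw [pvTypeOf_get?]
  simp only [List.contains_cons, List.contains_nil, Bool.or_false, beq_iff_eq]
  split_ifs <;> simp_all

lemma pvGroupAll (l : List String) (agents : List String) (t : String)
    (hpt : ∀ n : String, (agents.contains n = true) ↔ pvTypeOf.get? n = some t) :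
    ((l.filter (fun name => name != "")).all (fun name => agents.contains name) = true) ↔
      ∀ x ∈ pvMapped l, x = some t := by
  simp only [List.all_eq_true, pvMapped, List.mem_map]
  constructor
  · rintro h x ⟨n, hn, rfl⟩; exact (hpt n).1 (h n hn)
  · intro h n hn; exact (hpt n).2 (h _ ⟨n, hn, rfl⟩)

lemma A_iff (l : List String) :
    are_same_type_agents_py l = true ↔
      (∀ x ∈ pvMapped l, x = some "technical") ∨
      (∀ x ∈ pvMapped l, x = some "quality") ∨
      (∀ x ∈ pvMapped l, x = some "management") := by
  have hitems : (PySem.Dict.ofList [("technical", ["SolutionPlanningAgent", "CodeAgent"]),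
      ("quality", ["TestAgent"]), ("management", ["CTOAgent"])] :
      PySem.Dict String (List String)).items
      = [("technical", ["SolutionPlanningAgent", "CodeAgent"]),
         ("quality", ["TestAgent"]), ("management", ["CTOAgent"])] := by decide
  simp only [are_same_type_agents_py, hitems, List.any_cons, List.any_nil, Bool.or_false,
    Bool.or_eq_true]
  rw [pvGroupAll l _ _ pvMemT, pvGroupAll l _ _ pvMemQ, pvGroupAll l _ _ pvMemM]

lemma nodup_len_le_one {α : Type} (S : List α) (hnd : S.Nodup)
    (h : ∀ x ∈ S, ∀ y ∈ S, x = y) : S.length ≤ 1 := by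
  match S, hnd with
  | [], _ => simp
  | [a], _ => simp
  | a :: b :: rest, hnd =>
    exfalso
    have hab : a = b := h a (by simp) b (by simp)
    simp [hab] at hnd

lemma len_le_one_all_eq {α : Type} (S : List α) (h : S.length ≤ 1) :
    ∀ x ∈ S, ∀ y ∈ S, x = y := by
  match S with
  | [] => simp
  | [a] => simp
  | a :: b :: rest => simp at h

lemma B_iff (l : List String) :
    are_same_type_agents_py_alt l = true ↔
      (∀ x ∈ pvMapped l, ∀ y ∈ pvMapped l, x = y) ∧ none ∉ pvMapped l := by
  simp only [are_same_type_agents_py_alt, Bool.and_eq_true, decide_eq_true_eq,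
    Bool.not_eq_true', ← Bool.not_eq_true, PySem.Set.contains_iff, PySem.Set.mem_ofList]
  constructor
  · rintro ⟨hlen, hmem⟩
    refine ⟨fun x hx y hy => ?_, hmem⟩
    have hlen' : (PySem.Set.ofList (pvMapped l)).length ≤ 1 := by
      simpa [PySem.Set.len] using hlen
    exact len_le_one_all_eq _ hlen' x ((PySem.Set.mem_ofList _ _).2 hx)
      y ((PySem.Set.mem_ofList _ _).2 hy)
  · rintro ⟨heq, hmem⟩
    refine ⟨?_, hmem⟩
    have : (PySem.Set.ofList (pvMapped l)).length ≤ 1 :=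
      nodup_len_le_one _ (PySem.Set.nodup_ofList _)
        (fun x hx y hy => heq x ((PySem.Set.mem_ofList _ _).1 hx)
          y ((PySem.Set.mem_ofList _ _).1 hy))
    simp only [PySem.Set.len]
    exact_mod_cast this

-- ===== VERDICT (by name: the statement is the Claim_ definition above) =====
theorem are_same_type_agents_py_spec : Claim_equal_are_same_type_agents_py := by
  intro l _
  unfold Spec_are_same_type_agents_py
  rw [Bool.eq_iff_iff, A_iff, B_iff]
  constructor
  · rintro (h | h | h) <;>
      exact ⟨fun x hx y hy => by rw [h x hx, h y hy],
        fun hn => by have := h none hn; simp at this⟩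
  · rintro ⟨heq, hn⟩
    by_cases hM : pvMapped l = []
    · refine Or.inl fun x hx => ?_
      rw [hM] at hx
      exact absurd hx (List.not_mem_nil)
    · obtain ⟨a, ha⟩ := List.exists_mem_of_ne_nil _ hM
      have h4 := pvTypeOf_range a l ha
      have hne : a ≠ none := fun h => hn (h ▸ ha)
      have hall : ∀ t, a = some t → ∀ x ∈ pvMapped l, x = some t :=
        fun t hat x hx => hat ▸ heq x hx a ha
      rcases h4 with rfl | hat | hat | hat
      · exact absurd rfl hne
      · exact Or.inl (hall _ hat)
      · exact Or.inr (Or.inl (hall _ hat))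
      · exact Or.inr (Or.inr (hall _ hat))
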